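-- pv_equiv track=rewrite | github.com/Mjahnavi2201/python-bootcamp | sum_of_min_max.py | check
-- ===== SOURCE A (Python) =====
-- def check(num,l1):
--     s=str(num)
--     min1=int(s[0])
--     max1=int(s[0])
--     for i in s:
--         if int(i)>max1:
--             max1=int(i)
--         if int(i)<min1:
--             min1=int(i)
--     l1.append(min1)
--     l1.append(max1)
--     return l1
-- ===== SOURCE B (Python) =====
-- def check(num, l1):
--     digs = sorted(int(c) for c in str(num))
--     l1.append(digs[0])
--     l1.append(digs[-1])
--     return l1
-- ===== Notes on version B (the rewrite author's own statement) =====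
-- stated objective: simpler
-- what changed: Replaces the manual running min/max tracking loop with building the sorted digit list once and appending its first and last elements; Pre_ excludes negative num, on which both programs raise ValueError at the '-' character.
import Mathlib
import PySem

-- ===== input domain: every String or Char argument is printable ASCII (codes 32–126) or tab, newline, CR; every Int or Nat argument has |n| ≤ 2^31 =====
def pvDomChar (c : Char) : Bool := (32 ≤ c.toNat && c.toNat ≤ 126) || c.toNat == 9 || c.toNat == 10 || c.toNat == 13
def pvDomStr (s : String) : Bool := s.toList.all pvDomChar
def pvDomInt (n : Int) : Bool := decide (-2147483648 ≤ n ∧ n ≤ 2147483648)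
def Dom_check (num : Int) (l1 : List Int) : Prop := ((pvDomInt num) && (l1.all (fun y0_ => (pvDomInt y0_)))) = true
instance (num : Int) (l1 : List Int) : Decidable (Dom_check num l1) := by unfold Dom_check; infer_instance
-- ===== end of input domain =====

-- B replaces A's running min/max tracking by sorting the digit list once and taking its ends (objective: simpler).

-- ===== PORT A =====
-- int(c) for a single character c; under Pre_check every character of str(num) is a digit,
-- so ofChars? is never none and the .getD 0 default is unreachable.
def pvDigit (c : Char) : Int := (PySem.Int.ofChars? [c]).getD 0

def check (num : Int) (l1 : List Int) : List Int :=
  let s := PySem.Int.toChars num          -- s = str(num)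
  match s with
  | [] => l1                              -- unreachable: str(num) is never empty
  | c0 :: _ =>
    let d0 := pvDigit c0                  -- min1 = max1 = int(s[0])
    let st := s.foldl (fun (p : Int × Int) c =>
      let d := pvDigit c
      ((if d < p.1 then d else p.1), (if d > p.2 then d else p.2))) (d0, d0)
    l1 ++ [st.1, st.2]                    -- l1.append(min1); l1.append(max1)

-- ===== PORT B =====
def check_alt (num : Int) (l1 : List Int) : List Int :=
  let digs := PySem.List.sorted ((PySem.Int.toChars num).map pvDigit) (fun x => x) false
  match digs with
  | [] => l1                              -- unreachable: digs[0] on [] would be IndexError, str(num) is never empty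
  | d :: _ => l1 ++ [d, (PySem.List.pyGet? digs (-1)).getD 0]   -- digs[0], digs[-1]

-- ===== PRECONDITION & SPEC =====
-- Pre_ excludes negative num: str(num) then starts with '-' and int('-') raises ValueError in A (and in B).
def Pre_check (num : Int) (l1 : List Int) : Prop := 0 ≤ num
instance (num : Int) (l1 : List Int) : Decidable (Pre_check num l1) := by unfold Pre_check; infer_instance
def pvWitness_check : Int × List Int := (407, [1, 2])
def Spec_check (num : Int) (l1 : List Int) (out : List Int) : Prop := out = check_alt num l1
instance (num : Int) (l1 : List Int) (out : List Int) : Decidable (Spec_check num l1 out) := by unfold Spec_check; infer_instance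

-- ===== CLAIM (what is proved, stated in full; the proofs are below) =====
def Claim_equal_check : Prop := ∀ (num : Int) (l1 : List Int), Dom_check num l1 → Pre_check num l1 → Spec_check num l1 (check num l1)

-- ===== LEMMAS AND PROOFS =====

theorem foldl_pair_split (t : List Int) (a b : Int) :
    t.foldl (fun (p : Int × Int) d =>
      ((if d < p.1 then d else p.1), (if d > p.2 then d else p.2))) (a, b)
    = (t.foldl (fun m d => if d < m then d else m) a,
       t.foldl (fun M d => if d > M then d else M) b) := by
  induction t generalizing a b with
  | nil => rfl
  | cons c t ih => simp [List.foldl, ih]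

theorem foldl_min_le (t : List Int) (a : Int) :
    t.foldl (fun m d => if d < m then d else m) a ≤ a ∧
    ∀ x ∈ t, t.foldl (fun m d => if d < m then d else m) a ≤ x := by
  induction t generalizing a with
  | nil => simp
  | cons c t ih =>
    obtain ⟨h1, h2⟩ := ih (if c < a then c else a)
    refine ⟨le_trans h1 (by split <;> omega), ?_⟩
    intro x hx
    rcases List.mem_cons.mp hx with rfl | hx
    · exact le_trans h1 (by split <;> omega)
    · exact h2 x hx

theorem foldl_min_mem (t : List Int) (a : Int) :
    t.foldl (fun m d => if d < m then d else m) a ∈ a :: t := by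
  induction t generalizing a with
  | nil => simp
  | cons c t ih =>
    have := ih (if c < a then c else a)
    simp only [List.foldl]
    rcases List.mem_cons.mp this with h | h
    · rw [h]; split <;> simp
    · simp [h]

theorem foldl_max_ge (t : List Int) (a : Int) :
    a ≤ t.foldl (fun M d => if d > M then d else M) a ∧
    ∀ x ∈ t, x ≤ t.foldl (fun M d => if d > M then d else M) a := by
  induction t generalizing a with
  | nil => simp
  | cons c t ih =>
    obtain ⟨h1, h2⟩ := ih (if c > a then c else a)
    refine ⟨le_trans (by split <;> omega) h1, ?_⟩
    intro x hx
    rcases List.mem_cons.mp hx with rfl | hx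
    · exact le_trans (by split <;> omega) h1
    · exact h2 x hx

theorem foldl_max_mem (t : List Int) (a : Int) :
    t.foldl (fun M d => if d > M then d else M) a ∈ a :: t := by
  induction t generalizing a with
  | nil => simp
  | cons c t ih =>
    have := ih (if c > a then c else a)
    simp only [List.foldl]
    rcases List.mem_cons.mp this with h | h
    · rw [h]; split <;> simp
    · simp [h]

theorem last_getD_mem (l : List Int) (h : l ≠ []) : l.getLast?.getD 0 ∈ l := by
  rw [List.getLast?_eq_some_getLast h]
  exact List.getLast_mem h

theorem pairwise_le_last (l : List Int) (hp : l.Pairwise (· ≤ ·)) :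
    ∀ x ∈ l, x ≤ l.getLast?.getD 0 := by
  induction l with
  | nil => simp
  | cons a t ih =>
    rcases List.pairwise_cons.mp hp with ⟨ha, hpt⟩
    intro x hx
    rcases List.mem_cons.mp hx with rfl | hx
    · cases t with
      | nil => simp
      | cons b t' =>
        rw [List.getLast?_cons_cons]
        exact le_trans (ha _ (last_getD_mem (b :: t') (by simp))) (le_refl _)
    · cases t with
      | nil => simp at hx
      | cons b t' =>
        rw [List.getLast?_cons_cons]
        exact ih hpt x hx

-- min1 = head of the sorted digit list, max1 = its last element, for any nonempty Int list
theorem minmax_sorted (d0 : Int) (t : List Int) :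
    ((d0 :: t).foldl (fun m d => if d < m then d else m) d0
       = ((PySem.List.sorted (d0 :: t) (fun x => x) false).head?.getD 0)) ∧
    ((d0 :: t).foldl (fun M d => if d > M then d else M) d0
       = ((PySem.List.sorted (d0 :: t) (fun x => x) false).getLast?.getD 0)) := by
  set ds := d0 :: t with hds
  have hne : ds ≠ [] := by simp [hds]
  -- the sorted list is nonempty
  have hsne : PySem.List.sorted ds (fun x => x) false ≠ [] := by
    intro h; exact hne ((PySem.List.sorted_eq_nil_iff _ _ _).mp h)
  obtain ⟨m, r, hsrt⟩ := List.exists_cons_of_ne_nil hsne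
  have hpw : (PySem.List.sorted ds (fun x => x) false).Pairwise (fun a b => a ≤ b) :=
    PySem.List.sorted_pairwise ds (fun x => x)
  -- min side
  have hmin_mem : ds.foldl (fun m d => if d < m then d else m) d0 ∈ ds := by
    have := foldl_min_mem ds d0
    rcases List.mem_cons.mp this with h | h
    · rw [h]; simp [hds]
    · exact h
  have hmin_le : ∀ x ∈ ds, ds.foldl (fun m d => if d < m then d else m) d0 ≤ x :=
    (foldl_min_le ds d0).2
  have hm_le : ∀ y ∈ ds, m ≤ y := by
    intro y hy
    simpa using PySem.List.key_head_sorted_le (xs := ds) (key := fun x => x) hsrt y hy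
  have hm_mem : m ∈ ds := by
    have : m ∈ PySem.List.sorted ds (fun x => x) false := by rw [hsrt]; simp
    exact (PySem.List.mem_sorted _ _ _ _).mp this
  constructor
  · rw [hsrt]
    simp only [List.head?_cons, Option.getD_some]
    exact le_antisymm (hmin_le m hm_mem) (hm_le _ hmin_mem)
  -- max side
  · have hmax_mem : ds.foldl (fun M d => if d > M then d else M) d0 ∈ ds := by
      have := foldl_max_mem ds d0
      rcases List.mem_cons.mp this with h | h
      · rw [h]; simp [hds]
      · exact h
    have hmax_ge : ∀ x ∈ ds, x ≤ ds.foldl (fun M d => if d > M then d else M) d0 :=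
      (foldl_max_ge ds d0).2
    have hl_mem : (PySem.List.sorted ds (fun x => x) false).getLast?.getD 0 ∈ ds :=
      (PySem.List.mem_sorted _ _ _ _).mp (last_getD_mem _ hsne)
    have hl_ge : ∀ x ∈ ds, x ≤ (PySem.List.sorted ds (fun x => x) false).getLast?.getD 0 := by
      intro x hx
      exact pairwise_le_last _ hpw x ((PySem.List.mem_sorted _ _ _ _).mpr hx)
    exact le_antisymm (hl_ge _ hmax_mem) (hmax_ge _ hl_mem)

-- ===== VERDICT (by name: the statement is the Claim_ definition above) =====
theorem check_spec : Claim_equal_check := by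
  intro num l1 _ _
  unfold Spec_check check check_alt
  cases hcs : PySem.Int.toChars num with
  | nil => simp [PySem.List.sorted]
  | cons c0 rest =>
    simp only []
    have hfold : ∀ (cs : List Char) (p : Int × Int),
        cs.foldl (fun (p : Int × Int) c =>
          ((if pvDigit c < p.1 then pvDigit c else p.1), (if pvDigit c > p.2 then pvDigit c else p.2))) p
        = (cs.map pvDigit).foldl (fun (p : Int × Int) d =>
          ((if d < p.1 then d else p.1), (if d > p.2 then d else p.2))) p := by
      intro cs p; rw [List.foldl_map]
    rw [hfold, foldl_pair_split]
    have hmap : (c0 :: rest).map pvDigit = pvDigit c0 :: rest.map pvDigit := by simp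
    rw [hmap]
    obtain ⟨hmin, hmax⟩ := minmax_sorted (pvDigit c0) (rest.map pvDigit)
    rw [hmin, hmax]
    cases hsrt : PySem.List.sorted (pvDigit c0 :: rest.map pvDigit) (fun x => x) false with
    | nil =>
      exact absurd ((PySem.List.sorted_eq_nil_iff _ _ _).mp hsrt) (by simp)
    | cons d dr =>
      simp [PySem.List.pyGet?_neg_one]
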